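-- pv_equiv track=rewrite | github.com/ericjharaldsson/vfx | utilities/renaming.py | replace_name
-- ===== SOURCE A (Python) =====
-- def replace_name(node, old, new):
--     result = str()
--     for part in node.split("|"):
--         new_part = str()
--         for mod in part.split("_"):
--             if mod == old:
--                 new_part+=new
--             else:
--                 new_part+=mod
--             new_part+="_"
--         result+=new_part[:-1]+"|"
--     return result[:-1]
-- ===== SOURCE B (Python) =====
-- def replace_name(node, old, new):
--     out = []
--     seg = []
--     for ch in node:
--         if ch == '_' or ch == '|':
--             s = ''.join(seg)
--             out.append(new if s == old else s)
--             out.append(ch)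
--             seg = []
--         else:
--             seg.append(ch)
--     s = ''.join(seg)
--     out.append(new if s == old else s)
--     return ''.join(out)
-- ===== Notes on version B (the rewrite author's own statement) =====
-- stated objective: alternative
-- what changed: Replaced the nested split('|')/split('_') loops with trailing-delimiter appends and [:-1] trims by a single character-level pass that flushes each accumulated segment at either delimiter, replacing it when it equals old.
import Mathlib
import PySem

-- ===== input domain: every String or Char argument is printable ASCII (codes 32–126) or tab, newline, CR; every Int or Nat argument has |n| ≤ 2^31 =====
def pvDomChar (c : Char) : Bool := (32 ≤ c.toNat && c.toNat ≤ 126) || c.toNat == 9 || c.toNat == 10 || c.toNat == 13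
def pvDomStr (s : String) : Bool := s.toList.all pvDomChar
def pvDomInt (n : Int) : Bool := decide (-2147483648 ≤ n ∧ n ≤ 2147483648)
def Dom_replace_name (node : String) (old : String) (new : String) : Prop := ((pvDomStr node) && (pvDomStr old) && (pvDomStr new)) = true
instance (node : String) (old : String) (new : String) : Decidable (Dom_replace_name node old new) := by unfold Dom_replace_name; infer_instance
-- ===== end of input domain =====

-- B replaces A's nested split-on-'|'/split-on-'_' loops (with trailing-delimiter trims)
-- by one flat character pass that flushes each segment at either delimiter (objective: alternative).


-- ===== PORT A =====
def replace_name (node : String) (old : String) (new : String) : String :=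
  let result := (PySem.Chars.splitOn node.toList ['|']).foldl (fun result part =>
    let new_part := (PySem.Chars.splitOn part ['_']).foldl (fun new_part mod =>
      (if mod = old.toList then new_part ++ new.toList else new_part ++ mod) ++ ['_']) []
    result ++ PySem.List.slice new_part none (some (-1)) ++ ['|']) []
  String.ofList (PySem.List.slice result none (some (-1)))

-- ===== PORT B =====
def replace_name_alt (node : String) (old : String) (new : String) : String :=
  let fin := node.toList.foldl (fun (st : List Char × List Char) ch =>
    if ch = '_' ∨ ch = '|' then
      (st.1 ++ (if st.2 = old.toList then new.toList else st.2) ++ [ch], ([] : List Char))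
    else (st.1, st.2 ++ [ch])) ([], [])
  String.ofList (fin.1 ++ (if fin.2 = old.toList then new.toList else fin.2))

-- ===== PRECONDITION & SPEC =====
def Spec_replace_name (node : String) (old : String) (new : String) (out : String) : Prop := out = replace_name_alt node old new
instance (node : String) (old : String) (new : String) (out : String) : Decidable (Spec_replace_name node old new out) := by unfold Spec_replace_name; infer_instance

-- ===== CLAIM (what is proved, stated in full; the proofs are below) =====
def Claim_equal_replace_name : Prop := ∀ (node : String) (old : String) (new : String), Dom_replace_name node old new → Spec_replace_name node old new (replace_name node old new)

-- ===== LEMMAS AND PROOFS =====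

/-- replace a whole segment when it equals `old` -/
def repl (old new s : List Char) : List Char := if s = old then new else s

/-- prepend onto the first piece of a split -/
def consH (s : List Char) : List (List Char) → List (List Char)
  | [] => [s]
  | p :: ps => (s ++ p) :: ps

/-- reference single-char split (Python's str.split on a 1-char separator) -/
def splC (d : Char) : List Char → List (List Char)
  | [] => [[]]
  | c :: rest => if c = d then [] :: splC d rest else consH [c] (splC d rest)

/-- A's inner loop as a function of the '_'-split -/
def innerA (old new part : List Char) : List Char :=
  (((splC '_' part).map (fun m => repl old new m ++ ['_'])).flatten).dropLast

/-- A's whole result, with the first '_'-segment of the first '|'-part prefixed by `seg` -/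
def AfromSeg (old new seg cs : List Char) : List Char :=
  (((consH seg (splC '|' cs)).map (fun part => innerA old new part ++ ['|'])).flatten).dropLast

/-- B's scan in recursive form -/
def scanB (old new seg : List Char) : List Char → List Char
  | [] => repl old new seg
  | c :: rest =>
      if c = '_' ∨ c = '|' then repl old new seg ++ c :: scanB old new [] rest
      else scanB old new (seg ++ [c]) rest

theorem splC_ne_nil (d : Char) (l : List Char) : splC d l ≠ [] := by
  induction l with
  | nil => simp [splC]
  | cons c rest ih =>
      simp only [splC]
      split
      · simp
      · cases h : splC d rest with
        | nil => exact absurd h ih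
        | cons p ps => simp [consH]

theorem consH_nil (L : List (List Char)) (h : L ≠ []) : consH [] L = L := by
  cases L with
  | nil => exact absurd rfl h
  | cons p ps => simp [consH]

theorem consH_consH (s t : List Char) (L : List (List Char)) :
    consH s (consH t L) = consH (s ++ t) L := by
  cases L <;> simp [consH]

theorem splC_append (d : Char) (seg l : List Char) (h : d ∉ seg) :
    splC d (seg ++ l) = consH seg (splC d l) := by
  induction seg with
  | nil => exact (consH_nil _ (splC_ne_nil d l)).symm
  | cons c s ih =>
      have hc : c ≠ d := fun hcd => h (hcd ▸ List.mem_cons_self ..)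
      have hs : d ∉ s := fun hm => h (List.mem_cons_of_mem _ hm)
      simp only [List.cons_append, splC, if_neg hc, ih hs, consH_consH]
      rfl

theorem flatten_map_ne_nil (f : List Char → List Char) (d : Char) (L : List (List Char))
    (h : L ≠ []) : (L.map (fun x => f x ++ [d])).flatten ≠ [] := by
  cases L with
  | nil => exact absurd rfl h
  | cons p ps => simp

theorem dropLast_append' (a l : List Char) (h : l ≠ []) :
    (a ++ l).dropLast = a ++ l.dropLast :=
  List.dropLast_append_of_ne_nil h

theorem splC_self (d : Char) (rest : List Char) : splC d (d :: rest) = [] :: splC d rest := by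
  simp [splC]

/-- the fueled PySem split, characterized -/
theorem go_eq (d : Char) : ∀ (fuel : Nat) (l cur : List Char) (acc : List (List Char)),
    l.length ≤ fuel →
    PySem.Chars.splitOn.go [d] fuel l cur acc = acc.reverse ++ consH cur.reverse (splC d l) := by
  intro fuel
  induction fuel with
  | zero =>
      intro l cur acc hl
      have : l = [] := List.length_eq_zero_iff.mp (Nat.le_zero.mp hl)
      subst this
      simp [PySem.Chars.splitOn.go, splC, consH]
  | succ f ih =>
      intro l cur acc hl
      cases l with
      | nil => simp [PySem.Chars.splitOn.go, splC, consH]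
      | cons c rest =>
          simp only [PySem.Chars.splitOn.go]
          have hpre : [d].isPrefixOf (c :: rest) = (d == c) := by
            simp [List.isPrefixOf]
          by_cases hdc : c = d
          · subst hdc
            rw [hpre, if_pos (beq_self_eq_true c)]
            have hdrop : List.drop [c].length (c :: rest) = rest := by simp
            rw [hdrop, ih rest [] (cur.reverse :: acc) (Nat.le_of_succ_le_succ hl)]
            cases hL : splC c rest with
            | nil => exact absurd hL (splC_ne_nil c rest)
            | cons p ps => simp [splC_self, hL, consH]
          · have hfalse : (d == c) = false := by
              simp [Ne.symm hdc]
            rw [hpre, hfalse, if_neg (by simp)]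
            rw [ih rest (c :: cur) acc (Nat.le_of_succ_le_succ hl)]
            simp [splC, if_neg hdc, consH_consH, List.reverse_cons]

theorem splitOn_eq (d : Char) (l : List Char) :
    PySem.Chars.splitOn l [d] = splC d l := by
  unfold PySem.Chars.splitOn
  rw [go_eq d (l.length + 1) l [] [] (Nat.le_succ _)]
  simp only [List.reverse_nil, List.nil_append]
  exact consH_nil _ (splC_ne_nil d l)

theorem innerA_df (old new seg : List Char) (h : '_' ∉ seg) :
    innerA old new seg = repl old new seg := by
  have hs : splC '_' seg = [seg] := by
    have := splC_append '_' seg [] h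
    simpa [splC, consH] using this
  simp [innerA, hs]

theorem innerA_split (old new seg p : List Char) (h : '_' ∉ seg) :
    innerA old new (seg ++ '_' :: p) = repl old new seg ++ '_' :: innerA old new p := by
  have h1 : splC '_' (seg ++ '_' :: p) = seg :: splC '_' p := by
    rw [splC_append '_' seg _ h, splC_self]
    cases hL : splC '_' p with
    | nil => exact absurd hL (splC_ne_nil '_' p)
    | cons q qs => simp [consH]
  rw [innerA, h1]
  simp only [List.map_cons, List.flatten_cons]
  rw [show repl old new seg ++ ['_'] ++ (((splC '_' p).map (fun m => repl old new m ++ ['_'])).flatten)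
      = (repl old new seg ++ ['_']) ++ (((splC '_' p).map (fun m => repl old new m ++ ['_'])).flatten) by simp,
    dropLast_append' _ _ (flatten_map_ne_nil (repl old new) '_' _ (splC_ne_nil '_' p))]
  simp [innerA]

theorem AfromSeg_nil (old new seg : List Char) (h : '_' ∉ seg) :
    AfromSeg old new seg [] = repl old new seg := by
  simp [AfromSeg, splC, consH, innerA_df old new seg h]

theorem AfromSeg_pipe (old new seg rest : List Char) (h : '_' ∉ seg) :
    AfromSeg old new seg ('|' :: rest) =
      repl old new seg ++ '|' :: AfromSeg old new [] rest := by
  rw [AfromSeg, splC_self]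
  cases hs : splC '|' rest with
  | nil => exact absurd hs (splC_ne_nil '|' rest)
  | cons p ps =>
      simp only [consH, List.append_nil, List.map_cons, List.flatten_cons]
      rw [innerA_df old new seg h]
      rw [show repl old new seg ++ ['|'] ++ ((innerA old new p ++ ['|']) ++ (List.map (fun part => innerA old new part ++ ['|']) ps).flatten)
          = (repl old new seg ++ ['|']) ++ (((p :: ps).map (fun part => innerA old new part ++ ['|'])).flatten) by simp,
        dropLast_append' _ _ (flatten_map_ne_nil (innerA old new) '|' _ (by simp))]
      rw [AfromSeg, hs, consH_nil _ (by simp)]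
      simp

theorem AfromSeg_under (old new seg rest : List Char) (h : '_' ∉ seg) :
    AfromSeg old new seg ('_' :: rest) =
      repl old new seg ++ '_' :: AfromSeg old new [] rest := by
  rw [AfromSeg]
  rw [show splC '|' ('_' :: rest) = consH ['_'] (splC '|' rest) by simp [splC]]
  cases hs : splC '|' rest with
  | nil => exact absurd hs (splC_ne_nil '|' rest)
  | cons p ps =>
      simp only [consH, List.map_cons, List.flatten_cons, List.singleton_append]
      rw [show seg ++ '_' :: p = seg ++ '_' :: p from rfl]
      rw [show (seg ++ '_' :: p) = seg ++ ('_' :: p) by simp, innerA_split old new seg p h]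
      rw [show (repl old new seg ++ '_' :: innerA old new p) ++ ['|'] ++ (List.map (fun part => innerA old new part ++ ['|']) ps).flatten
          = (repl old new seg ++ ['_']) ++ ((innerA old new p ++ ['|']) ++ ((ps.map (fun part => innerA old new part ++ ['|'])).flatten)) by simp,
        dropLast_append' _ _ (by simp)]
      rw [AfromSeg, hs, consH_nil _ (by simp)]
      simp

theorem AfromSeg_other (old new seg rest : List Char) (c : Char) (h2 : c ≠ '|') :
    AfromSeg old new seg (c :: rest) = AfromSeg old new (seg ++ [c]) rest := by
  simp only [AfromSeg, splC, if_neg h2, consH_consH]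

theorem scanB_eq_AfromSeg (old new : List Char) (cs : List Char) :
    ∀ seg, '_' ∉ seg → '|' ∉ seg → scanB old new seg cs = AfromSeg old new seg cs := by
  induction cs with
  | nil => intro seg h1 _; rw [AfromSeg_nil old new seg h1]; rfl
  | cons c rest ih =>
      intro seg h1 h2
      by_cases hu : c = '_'
      · subst hu
        rw [AfromSeg_under old new seg rest h1, scanB, if_pos (Or.inl rfl),
          ih [] (by simp) (by simp)]
      · by_cases hp : c = '|'
        · subst hp
          rw [AfromSeg_pipe old new seg rest h1, scanB, if_pos (Or.inr rfl),
            ih [] (by simp) (by simp)]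
        · rw [AfromSeg_other old new seg rest c hp, scanB,
            if_neg (by rintro (h | h); exacts [hu h, hp h])]
          refine ih (seg ++ [c]) ?_ ?_
          · intro hm
            rcases List.mem_append.mp hm with hm | hm
            · exact h1 hm
            · exact hu (List.mem_singleton.mp hm).symm
          · intro hm
            rcases List.mem_append.mp hm with hm | hm
            · exact h2 hm
            · exact hp (List.mem_singleton.mp hm).symm

theorem foldlA_inner (old new : List Char) : ∀ (L : List (List Char)) (acc : List Char),
    L.foldl (fun new_part mod =>
      (if mod = old then new_part ++ new else new_part ++ mod) ++ ['_']) acc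
    = acc ++ (L.map (fun m => repl old new m ++ ['_'])).flatten := by
  intro L
  induction L with
  | nil => intro acc; simp
  | cons m ms ih =>
      intro acc
      simp only [List.foldl_cons, List.map_cons, List.flatten_cons, ih]
      by_cases h : m = old <;> simp [repl, h]

theorem foldlA_outer (g : List Char → List Char) : ∀ (L : List (List Char)) (acc : List Char),
    L.foldl (fun result part => result ++ g part ++ ['|']) acc
    = acc ++ (L.map (fun part => g part ++ ['|'])).flatten := by
  intro L
  induction L with
  | nil => intro acc; simp
  | cons p ps ih =>
      intro acc
      rw [List.foldl_cons, ih]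
      simp

theorem A_eq_AfromSeg (node old new : String) :
    replace_name node old new = String.ofList (AfromSeg old.toList new.toList [] node.toList) := by
  show String.ofList (PySem.List.slice
      ((PySem.Chars.splitOn node.toList ['|']).foldl (fun result part =>
        result ++ PySem.List.slice
          ((PySem.Chars.splitOn part ['_']).foldl (fun new_part mod =>
            (if mod = old.toList then new_part ++ new.toList else new_part ++ mod) ++ ['_']) [])
          none (some (-1)) ++ ['|']) [])
      none (some (-1))) = _
  rw [splitOn_eq '|' node.toList,
    foldlA_outer (fun part => PySem.List.slice
      ((PySem.Chars.splitOn part ['_']).foldl (fun new_part mod =>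
        (if mod = old.toList then new_part ++ new.toList else new_part ++ mod) ++ ['_']) [])
      none (some (-1))) (splC '|' node.toList) []]
  rw [List.map_congr_left (fun part _ => by
    simp only
    rw [splitOn_eq '_' part, foldlA_inner old.toList new.toList (splC '_' part) [],
      PySem.List.slice_to_neg_one]
    rfl :
    ∀ part ∈ splC '|' node.toList,
      (fun part => PySem.List.slice
        ((PySem.Chars.splitOn part ['_']).foldl (fun new_part mod =>
          (if mod = old.toList then new_part ++ new.toList else new_part ++ mod) ++ ['_']) [])
        none (some (-1))) part ++ ['|']
      = innerA old.toList new.toList part ++ ['|'])]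
  rw [PySem.List.slice_to_neg_one, AfromSeg, consH_nil _ (splC_ne_nil '|' node.toList)]
  rfl

theorem B_foldl (old new : List Char) (cs : List Char) :
    ∀ (out seg : List Char),
      (cs.foldl (fun (st : List Char × List Char) ch =>
        if ch = '_' ∨ ch = '|' then
          (st.1 ++ (if st.2 = old then new else st.2) ++ [ch], ([] : List Char))
        else (st.1, st.2 ++ [ch])) (out, seg)).1
      ++ (if (cs.foldl (fun (st : List Char × List Char) ch =>
        if ch = '_' ∨ ch = '|' then
          (st.1 ++ (if st.2 = old then new else st.2) ++ [ch], ([] : List Char))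
        else (st.1, st.2 ++ [ch])) (out, seg)).2 = old then new
          else (cs.foldl (fun (st : List Char × List Char) ch =>
        if ch = '_' ∨ ch = '|' then
          (st.1 ++ (if st.2 = old then new else st.2) ++ [ch], ([] : List Char))
        else (st.1, st.2 ++ [ch])) (out, seg)).2)
      = out ++ scanB old new seg cs := by
  induction cs with
  | nil => intro out seg; simp [scanB, repl]
  | cons c rest ih =>
      intro out seg
      by_cases hd : c = '_' ∨ c = '|'
      · simp only [List.foldl_cons, if_pos hd]
        rw [ih (out ++ (if seg = old then new else seg) ++ [c]) []]
        simp [scanB, if_pos hd, repl]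
      · simp only [List.foldl_cons, if_neg hd]
        rw [ih out (seg ++ [c])]
        simp [scanB, if_neg hd]

theorem B_eq_scanB (node old new : String) :
    replace_name_alt node old new = String.ofList (scanB old.toList new.toList [] node.toList) := by
  show String.ofList ((node.toList.foldl (fun (st : List Char × List Char) ch =>
      if ch = '_' ∨ ch = '|' then
        (st.1 ++ (if st.2 = old.toList then new.toList else st.2) ++ [ch], ([] : List Char))
      else (st.1, st.2 ++ [ch])) ([], [])).1
    ++ (if (node.toList.foldl (fun (st : List Char × List Char) ch =>
      if ch = '_' ∨ ch = '|' then
        (st.1 ++ (if st.2 = old.toList then new.toList else st.2) ++ [ch], ([] : List Char))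
      else (st.1, st.2 ++ [ch])) ([], [])).2 = old.toList then new.toList
        else (node.toList.foldl (fun (st : List Char × List Char) ch =>
      if ch = '_' ∨ ch = '|' then
        (st.1 ++ (if st.2 = old.toList then new.toList else st.2) ++ [ch], ([] : List Char))
      else (st.1, st.2 ++ [ch])) ([], [])).2)) = _
  rw [B_foldl old.toList new.toList node.toList [] []]
  simp

-- ===== VERDICT (by name: the statement is the Claim_ definition above) =====
theorem replace_name_spec : Claim_equal_replace_name := by
  intro node old new _
  unfold Spec_replace_name
  rw [A_eq_AfromSeg, B_eq_scanB,
    scanB_eq_AfromSeg old.toList new.toList node.toList [] (by simp) (by simp)]
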